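-- pv_equiv track=rewrite | github.com/falco81/Kuro | kurodlc_add_mdl.py | find_available_dlc_id
-- ===== SOURCE A (Python) =====
-- DLC_ID_MIN = 1
--
-- DLC_ID_MAX = 350
--
-- def find_available_dlc_id(used_dlc_ids, min_id=DLC_ID_MIN, max_id=DLC_ID_MAX):
--     """
--     Find an available DLC ID in range [min_id, max_id).
--     Strategy: start after highest used ID within range, then wrap around.
--
--     Returns int or None if no IDs available.
--     """
--     if not used_dlc_ids:
--         return min_id + 1
--
--     # Find highest used ID within range
--     ids_in_range = [i for i in used_dlc_ids if min_id <= i < max_id]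
--     if ids_in_range:
--         start = max(ids_in_range) + 1
--     else:
--         start = min_id
--
--     # Search forward from start
--     for i in range(start, max_id):
--         if i not in used_dlc_ids:
--             return i
--
--     # Wrap: search from min_id to start
--     for i in range(min_id, start):
--         if i not in used_dlc_ids:
--             return i
--
--     return None
-- ===== SOURCE B (Python) =====
-- DLC_ID_MIN = 1
--
-- DLC_ID_MAX = 350
--
-- def find_available_dlc_id(used_dlc_ids, min_id=DLC_ID_MIN, max_id=DLC_ID_MAX):
--     """
--     Find an available DLC ID in range [min_id, max_id).
--     Sort the distinct in-range used IDs once; the forward candidate is a closed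
--     form (one past the highest), and the wrap-around candidate is the first gap
--     of the sorted list. Never scans the ID range itself.
--     """
--     if not used_dlc_ids:
--         return min_id + 1
--
--     in_range = sorted({i for i in used_dlc_ids if min_id <= i < max_id})
--     if not in_range:
--         return min_id if min_id < max_id else None
--
--     start = in_range[-1] + 1
--     if start < max_id:
--         return start
--
--     # range exhausted above the highest used ID: take the first gap from min_id
--     c = min_id
--     for u in in_range:
--         if u == c:
--             c += 1
--         else:
--             break
--     return c if c < start else None
-- ===== Notes on version B (the rewrite author's own statement) =====
-- stated objective: alternative
-- what changed: Replaces A's two candidate-scanning loops (membership test per candidate of the ID range) with one sort of the distinct in-range used IDs: the forward answer is the closed form max+1 and the wrap answer is the first gap of the sorted list, so the ID range itself is never traversed.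
import Mathlib
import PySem

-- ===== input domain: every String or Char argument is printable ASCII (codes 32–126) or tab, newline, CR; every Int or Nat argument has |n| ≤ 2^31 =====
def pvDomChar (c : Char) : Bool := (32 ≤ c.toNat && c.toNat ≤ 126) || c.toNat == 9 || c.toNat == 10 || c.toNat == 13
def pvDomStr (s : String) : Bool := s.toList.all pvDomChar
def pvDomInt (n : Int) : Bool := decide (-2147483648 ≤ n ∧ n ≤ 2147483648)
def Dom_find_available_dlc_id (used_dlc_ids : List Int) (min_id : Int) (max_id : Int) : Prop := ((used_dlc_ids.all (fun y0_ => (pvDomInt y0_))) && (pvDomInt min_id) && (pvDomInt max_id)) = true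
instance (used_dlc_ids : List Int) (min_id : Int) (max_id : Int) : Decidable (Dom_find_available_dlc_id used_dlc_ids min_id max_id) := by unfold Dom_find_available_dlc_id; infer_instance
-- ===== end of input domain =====

-- B replaces A's two candidate-scanning loops (membership test per candidate) by one sort of the
-- distinct in-range used IDs: forward answer = closed form max+1, wrap answer = first gap of the sorted list.

-- ===== PORT A =====
-- "for i in range(a, b): if i not in xs: return i" as an early-returning counted loop
def pvScan (xs : List Int) : Int → Nat → Option Int
  | _, 0 => none
  | i, Nat.succ fuel => if !xs.contains i then some i else pvScan xs (i + 1) fuel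

def find_available_dlc_id (used_dlc_ids : List Int) (min_id : Int) (max_id : Int) : Option Int :=
  if used_dlc_ids = [] then some (min_id + 1)
  else
    let ids_in_range := used_dlc_ids.filter (fun i => decide (min_id ≤ i) && decide (i < max_id))
    let start :=
      match PySem.List.max? ids_in_range (fun y => y) with
      | some m => m + 1
      | none => min_id
    -- Search forward from start
    match pvScan used_dlc_ids start (max_id - start).toNat with
    | some i => some i
    | none =>
      -- Wrap: search from min_id to start
      match pvScan used_dlc_ids min_id (start - min_id).toNat with
      | some i => some i
      | none => none

-- ===== PORT B =====
-- the 'first gap' for-loop with break of Source B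
def pvFirstGap : Int → List Int → Int
  | c, [] => c
  | c, u :: t => if u = c then pvFirstGap (c + 1) t else c

def find_available_dlc_id_alt (used_dlc_ids : List Int) (min_id : Int) (max_id : Int) : Option Int :=
  if used_dlc_ids = [] then some (min_id + 1)
  else
    let in_range := PySem.List.sorted
      (PySem.Set.ofList (used_dlc_ids.filter (fun i => decide (min_id ≤ i) && decide (i < max_id))))
      (fun y => y)
    if in_range = [] then (if min_id < max_id then some min_id else none)
    else
      let start := PySem.List.pyGetD in_range (-1) 0 + 1
      if start < max_id then some start
      else
        let c := pvFirstGap min_id in_range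
        if c < start then some c else none

-- ===== PRECONDITION & SPEC =====
def Spec_find_available_dlc_id (used_dlc_ids : List Int) (min_id : Int) (max_id : Int) (out : Option Int) : Prop := out = find_available_dlc_id_alt used_dlc_ids min_id max_id
instance (used_dlc_ids : List Int) (min_id : Int) (max_id : Int) (out : Option Int) : Decidable (Spec_find_available_dlc_id used_dlc_ids min_id max_id out) := by unfold Spec_find_available_dlc_id; infer_instance

-- ===== CLAIM (what is proved, stated in full; the proofs are below) =====
def Claim_equal_find_available_dlc_id : Prop := ∀ (used_dlc_ids : List Int) (min_id : Int) (max_id : Int), Dom_find_available_dlc_id used_dlc_ids min_id max_id → Spec_find_available_dlc_id used_dlc_ids min_id max_id (find_available_dlc_id used_dlc_ids min_id max_id)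

-- ===== LEMMAS AND PROOFS =====

-- every member of a strictly increasing list is ≤ its last element
lemma pvMemLeLast (l : List Int) (hpw : l.Pairwise (· < ·)) (h : l ≠ []) :
    ∀ y ∈ l, y ≤ l.getLast h := by
  induction l with
  | nil => exact absurd rfl h
  | cons x t ih =>
      intro y hy
      by_cases ht : t = []
      · subst ht
        simp at hy
        simp [hy]
      · rw [List.getLast_cons ht]
        rcases List.mem_cons.mp hy with rfl | hyt
        · exact le_of_lt ((List.pairwise_cons.mp hpw).1 _ (List.getLast_mem ht))
        · exact ih (List.pairwise_cons.mp hpw).2 ht y hyt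

-- the first-gap loop: its result is ≥ a, not in the list, and everything between a and it is in the list
lemma pvGapSpec (l : List Int) (a : Int) (hpw : l.Pairwise (· < ·)) (hge : ∀ y ∈ l, a ≤ y) :
    a ≤ pvFirstGap a l ∧ pvFirstGap a l ∉ l ∧
      ∀ i, a ≤ i → i < pvFirstGap a l → i ∈ l := by
  induction l generalizing a with
  | nil => exact ⟨le_refl a, by simp [pvFirstGap], fun i h1 h2 => by simp [pvFirstGap] at h2; omega⟩
  | cons u t ih =>
      by_cases hu : u = a
      · subst hu
        have hge' : ∀ y ∈ t, u + 1 ≤ y := fun y hy => (List.pairwise_cons.mp hpw).1 y hy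
        obtain ⟨h1, h2, h3⟩ := ih (u + 1) (List.pairwise_cons.mp hpw).2 hge'
        have hg : pvFirstGap u (u :: t) = pvFirstGap (u + 1) t := by simp [pvFirstGap]
        refine ⟨by omega, ?_, ?_⟩
        · rw [hg]
          intro hmem
          rcases List.mem_cons.mp hmem with heq | hmt
          · omega
          · exact h2 hmt
        · intro i hi1 hi2
          rw [hg] at hi2
          by_cases hiu : i = u
          · simp [hiu]
          · exact List.mem_cons_of_mem _ (h3 i (by omega) hi2)
      · have hg : pvFirstGap a (u :: t) = a := by simp [pvFirstGap, hu]
        rw [hg]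
        refine ⟨le_refl a, ?_, fun i h1 h2 => absurd (lt_of_le_of_lt h1 h2) (by omega)⟩
        intro hmem
        rcases List.mem_cons.mp hmem with heq | hmt
        · exact hu heq.symm
        · have := (List.pairwise_cons.mp hpw).1 _ hmt
          have := hge u (by simp)
          omega

-- the counted early-return loop is find? over the corresponding ascending range
lemma pvScanEq (xs : List Int) (b : Int) : ∀ (a : Int),
    pvScan xs a (b - a).toNat = (PySem.List.pyRange a b 1).find? (fun i => !xs.contains i) := by
  intro a
  induction hn : (b - a).toNat generalizing a with
  | zero =>
      rw [PySem.List.pyRange_one_eq_nil (by omega)]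
      rfl
  | succ n ih =>
      have hab : a < b := by omega
      rw [PySem.List.pyRange_one_cons hab]
      by_cases hpa : a ∈ xs
      · simp only [pvScan]
        rw [if_neg (by simp [hpa]), ih (a + 1) (by omega)]
        simp [hpa]
      · simp [pvScan, hpa]

-- find? over an ascending integer range, characterised by the first index c where p flips to true
lemma pvFindRange (p : Int → Bool) (b c : Int) : ∀ (a : Int), a ≤ c →
    (∀ i, a ≤ i → i < b → i < c → p i = false) → (c < b → p c = true) →
    (PySem.List.pyRange a b 1).find? p = if c < b then some c else none := by
  intro a
  induction hn : (b - a).toNat generalizing a with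
  | zero =>
      intro hac hbelow hc
      have hba : b ≤ a := by omega
      rw [PySem.List.pyRange_one_eq_nil hba]
      simp
      omega
  | succ n ih =>
      intro hac hbelow hc
      have hab : a < b := by omega
      rw [PySem.List.pyRange_one_cons hab]
      by_cases hcc : a = c
      · subst hcc
        simp [hc hab, hab]
      · have hpa : p a = false := hbelow a (le_refl a) hab (by omega)
        rw [show (a :: PySem.List.pyRange (a + 1) b 1).find? p
              = (PySem.List.pyRange (a + 1) b 1).find? p by
            simp [hpa]]
        exact ih (a + 1) (by omega) (by omega)
          (fun i h1 h2 h3 => hbelow i (by omega) h2 h3) hc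

theorem pvCore (xs : List Int) (mn mx : Int) :
    find_available_dlc_id xs mn mx = find_available_dlc_id_alt xs mn mx := by
  unfold find_available_dlc_id find_available_dlc_id_alt
  by_cases hxs : xs = []
  · simp [hxs]
  simp only [if_neg hxs]
  set p : Int → Bool := fun i => !xs.contains i with hp
  set filt := xs.filter (fun i => decide (mn ≤ i) && decide (i < mx)) with hfilt
  set inr := PySem.List.sorted (PySem.Set.ofList filt) (fun y => y) with hinrdef
  have hmemInr : ∀ x : Int, x ∈ inr ↔ (x ∈ xs ∧ mn ≤ x ∧ x < mx) := by
    intro x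
    rw [hinrdef, PySem.List.mem_sorted, PySem.Set.mem_ofList, hfilt, List.mem_filter]
    simp
  have hpwInr : inr.Pairwise (· < ·) := PySem.List.sorted_ofList_pairwise_lt filt
  have hpt : ∀ i : Int, i ∉ xs → p i = true := by
    intro i hi
    simp [hp, hi]
  have hpf : ∀ i : Int, i ∈ xs → p i = false := by
    intro i hi
    simp [hp, hi]
  by_cases hinr : inr = []
  · -- no used IDs inside the range
    have hfe : filt = [] := by
      rcases List.eq_nil_or_concat filt with h | ⟨l, x, h⟩
      · exact h
      · exfalso
        have hx : x ∈ filt := by simp [h]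
        have : x ∈ inr := by
          rw [hmemInr]
          rw [hfilt, List.mem_filter] at hx
          simp at hx
          exact ⟨hx.1, hx.2⟩
        simp [hinr] at this
    have hmax : PySem.List.max? filt (fun y : Int => y) = none :=
      (PySem.List.max?_eq_none_iff filt _).mpr hfe
    simp only [hmax, if_pos hinr]
    rw [pvScanEq xs mx mn, pvScanEq xs mn mn]
    have hfind : (PySem.List.pyRange mn mx 1).find? p =
        if mn < mx then some mn else none := by
      refine pvFindRange p mx mn mn (le_refl mn) (fun i h1 _ h3 => absurd (lt_of_le_of_lt h1 h3) (by omega)) ?_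
      intro hmm
      refine hpt mn (fun hmem => ?_)
      have : mn ∈ inr := (hmemInr mn).mpr ⟨hmem, le_refl mn, hmm⟩
      simp [hinr] at this
    rw [hfind]
    by_cases hmm : mn < mx
    · simp [hmm]
    · rw [if_neg hmm, PySem.List.pyRange_one_eq_nil (le_refl mn)]
      rfl
  · -- some used IDs inside the range
    rw [if_neg hinr]
    set M := inr.getLast hinr with hM
    have hMmem : M ∈ inr := List.getLast_mem hinr
    have hMrange := (hmemInr M).mp hMmem
    cases hmax : PySem.List.max? filt (fun y : Int => y) with
    | none =>
        exfalso
        have : filt = [] := (PySem.List.max?_eq_none_iff filt _).mp hmax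
        have : M ∈ filt := by
          rw [hfilt, List.mem_filter]
          simp
          exact ⟨hMrange.1, hMrange.2.1, hMrange.2.2⟩
        simp_all
    | some m =>
        have hmfilt : m ∈ filt := PySem.List.max?_mem hmax
        have hmrange : m ∈ xs ∧ mn ≤ m ∧ m < mx := by
          rw [hfilt, List.mem_filter] at hmfilt
          simp at hmfilt
          exact ⟨hmfilt.1, hmfilt.2.1, hmfilt.2.2⟩
        have hmM : m = M := by
          refine le_antisymm ?_ ?_
          · exact pvMemLeLast inr hpwInr hinr m ((hmemInr m).mpr hmrange)
          · have hMfilt : M ∈ filt := by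
              rw [hfilt, List.mem_filter]
              simp
              exact ⟨hMrange.1, hMrange.2.1, hMrange.2.2⟩
            exact PySem.List.max?_isMax hmax M hMfilt
        rw [PySem.List.pyGetD_neg_one inr 0 hinr, ← hM, ← hmM]
        rw [pvScanEq xs mx (m + 1), pvScanEq xs (m + 1) mn]
        by_cases hs : m + 1 < mx
        · -- forward candidate exists: it is m+1
          have hfwd : (PySem.List.pyRange (m + 1) mx 1).find? p = some (m + 1) := by
            have := pvFindRange p mx (m + 1) (m + 1) (le_refl _)
              (fun i h1 _ h3 => absurd (lt_of_le_of_lt h1 h3) (by omega)) ?_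
            · rw [this, if_pos hs]
            · intro _
              refine hpt (m + 1) (fun hmem => ?_)
              have h1 : m + 1 ∈ inr := (hmemInr (m + 1)).mpr ⟨hmem, by omega, hs⟩
              have := pvMemLeLast inr hpwInr hinr (m + 1) h1
              omega
          rw [hfwd, if_pos hs]
        · -- range exhausted above m: wrap to the first gap
          have hsmx : m + 1 = mx ∨ mx ≤ m + 1 := by omega
          have hfe : PySem.List.pyRange (m + 1) mx 1 = [] :=
            PySem.List.pyRange_one_eq_nil (by omega)
          rw [hfe]
          simp only [List.find?_nil]
          set c := pvFirstGap mn inr with hc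
          have hge : ∀ y ∈ inr, mn ≤ y := fun y hy => ((hmemInr y).mp hy).2.1
          obtain ⟨hg1, hg2, hg3⟩ := pvGapSpec inr mn hpwInr hge
          have hwrap : (PySem.List.pyRange mn (m + 1) 1).find? p =
              if c < m + 1 then some c else none := by
            refine pvFindRange p (m + 1) c mn hg1 ?_ ?_
            · intro i h1 h2 h3
              exact hpf i ((hmemInr i).mp (hg3 i h1 h3)).1
            · intro hcb
              refine hpt c (fun hmem => ?_)
              exact hg2 ((hmemInr c).mpr ⟨hmem, hg1, by omega⟩)
          rw [hwrap, if_neg hs]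
          by_cases hcs : c < m + 1
          · simp [hcs]
          · simp [hcs]

-- ===== VERDICT (by name: the statement is the Claim_ definition above) =====
theorem find_available_dlc_id_spec : Claim_equal_find_available_dlc_id := by
  intro xs mn mx _
  show _ = _
  exact pvCore xs mn mx
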